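-- pv_equiv track=rewrite | github.com/Saravanan-S1980/ap-learning | app.py | _indian_fmt
-- ===== SOURCE A (Python) =====
-- def _indian_fmt(amount) -> str:
--     """Format a number in Indian numbering style with ₹ prefix."""
--     n = int(amount)
--     s = str(n)
--     if len(s) <= 3:
--         return f"₹{s}"
--     last3 = s[-3:]
--     rest  = s[:-3]
--     pairs = []
--     while rest:
--         pairs.append(rest[-2:])
--         rest = rest[:-2]
--     pairs.reverse()
--     return "₹" + ",".join(pairs) + "," + last3
-- ===== SOURCE B (Python) =====
-- def _indian_fmt(amount) -> str:
--     """Format a number in Indian numbering style with a rupee prefix."""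
--     n = int(amount)
--     s = str(n)
--     if len(s) <= 3:
--         return f"₹{s}"
--     out = []
--     for i, ch in enumerate(reversed(s)):
--         if i >= 3 and (i - 3) % 2 == 0:
--             out.append(',')
--         out.append(ch)
--     return "₹" + "".join(reversed(out))
-- ===== Notes on version B (the rewrite author's own statement) =====
-- stated objective: alternative
-- what changed: Replaces A's while-loop that repeatedly slices two-char chunks off the head string into a list that is then reversed and comma-joined, by a single pass over the reversed digit string that inserts commas positionally and reverses the collected characters once.
import Mathlib
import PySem

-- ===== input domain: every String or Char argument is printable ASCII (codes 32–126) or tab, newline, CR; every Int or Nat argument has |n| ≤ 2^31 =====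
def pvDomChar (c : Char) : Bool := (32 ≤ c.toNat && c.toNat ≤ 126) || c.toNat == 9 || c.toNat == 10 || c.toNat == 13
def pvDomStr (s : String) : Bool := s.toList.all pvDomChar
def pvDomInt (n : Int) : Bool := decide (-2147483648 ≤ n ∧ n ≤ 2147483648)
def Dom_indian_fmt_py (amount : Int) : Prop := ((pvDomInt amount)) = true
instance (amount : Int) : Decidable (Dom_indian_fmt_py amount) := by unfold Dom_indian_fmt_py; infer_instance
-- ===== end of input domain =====

-- B replaces A's while-loop of 2-char tail slices (collected, reversed, comma-joined) by one
-- pass over the reversed digits that inserts commas positionally; return values only, no mutation.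

-- ===== PORT A =====
-- the 'while rest:' loop: pairs.append(rest[-2:]); rest = rest[:-2]
def pvPairsLoop (rest : List Char) (pairs : List (List Char)) : List (List Char) :=
  if h : rest = [] then pairs
  else pvPairsLoop (PySem.List.slice rest none (some (-2)))
      (pairs ++ [PySem.List.slice rest (some (-2)) none])
termination_by rest.length
decreasing_by
  rw [PySem.List.slice_to_neg_ofNat rest 2 (by omega)]
  have : rest.length ≠ 0 := fun hc => h (List.eq_nil_of_length_eq_zero hc)
  simp; omega

def indian_fmt_py (amount : Int) : String :=
  let n := amount                                   -- n = int(amount); amount is already an int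
  let s := PySem.Int.toChars n
  if s.length ≤ 3 then String.ofList ('₹' :: s)
  else
    let last3 := PySem.List.slice s (some (-3)) none
    let rest  := PySem.List.slice s none (some (-3))
    let pairs := (pvPairsLoop rest []).reverse
    String.ofList ('₹' :: (PySem.Chars.join [','] pairs ++ [','] ++ last3))

-- ===== PORT B =====
def indian_fmt_py_alt (amount : Int) : String :=
  let n := amount
  let s := PySem.Int.toChars n
  if s.length ≤ 3 then String.ofList ('₹' :: s)
  else
    let out := (PySem.List.enumerate s.reverse 0).foldl
      (fun acc (p : Int × Char) =>
        (if (3 ≤ p.1) && (PySem.Int.mod (p.1 - 3) 2 == 0) then acc ++ [','] else acc) ++ [p.2])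
      ([] : List Char)
    String.ofList ('₹' :: out.reverse)

-- ===== PRECONDITION & SPEC =====
def Spec_indian_fmt_py (amount : Int) (out : String) : Prop := out = indian_fmt_py_alt amount
instance (amount : Int) (out : String) : Decidable (Spec_indian_fmt_py amount out) := by unfold Spec_indian_fmt_py; infer_instance

-- ===== CLAIM (what is proved, stated in full; the proofs are below) =====
def Claim_equal_indian_fmt_py : Prop := ∀ (amount : Int), Dom_indian_fmt_py amount → Spec_indian_fmt_py amount (indian_fmt_py amount)

-- ===== LEMMAS AND PROOFS =====

-- B's comma condition at right-index i
def pvCond (i : Int) : Bool := (3 ≤ i) && (PySem.Int.mod (i - 3) 2 == 0)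

lemma pvCond_nat (m : Nat) : pvCond (m : Int) = (decide (3 ≤ m) && decide (m % 2 = 1)) := by
  simp only [pvCond, PySem.Int.mod]
  rcases Nat.lt_or_ge m 3 with h | h
  · interval_cases m <;> decide
  · have h3 : Int.fmod ((m : Int) - 3) 2 = ((m : Int) - 3) % 2 := by
      rw [Int.fmod_eq_emod]; simp
    rw [h3]
    by_cases hm : m % 2 = 1 <;> simp [h, hm] <;> omega

-- ebody: what B's foldl body accumulates (left-to-right over the reversed string)
def pvEbody : List Char → Int → List Char
  | [], _ => []
  | c :: t, i => (if pvCond i then [','] else []) ++ c :: pvEbody t (i + 1)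

lemma foldl_enumerate_eq_ebody (r : List Char) (i : Int) (acc : List Char) :
    (PySem.List.enumerate r i).foldl
      (fun acc (p : Int × Char) =>
        (if (3 ≤ p.1) && (PySem.Int.mod (p.1 - 3) 2 == 0) then acc ++ [','] else acc) ++ [p.2])
      acc = acc ++ pvEbody r i := by
  induction r generalizing i acc with
  | nil => simp [PySem.List.enumerate_nil, pvEbody]
  | cons c t ih =>
    rw [PySem.List.enumerate_cons]
    simp only [List.foldl_cons, ih, pvEbody, pvCond]
    split <;> simp

lemma pvEbody_append (x y : List Char) (i : Int) :
    pvEbody (x ++ y) i = pvEbody x i ++ pvEbody y (i + x.length) := by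
  induction x generalizing i with
  | nil => simp [pvEbody]
  | cons c t ih =>
    simp only [List.cons_append, pvEbody, ih]
    have : i + 1 + (t.length : Int) = i + (t.length + 1 : Nat) := by push_cast; ring
    rw [this]
    simp

-- generalized emit with an offset added to every suffix length
def pvEmitAt : List Char → Int → List Char
  | [], _ => []
  | c :: t, j => c :: ((if pvCond (j + t.length) then [','] else []) ++ pvEmitAt t j)

lemma pvEbody_reverse (s : List Char) (j : Int) :
    pvEbody s.reverse j = (pvEmitAt s j).reverse := by
  induction s with
  | nil => rfl
  | cons c t ih =>
    have : (c :: t).reverse = t.reverse ++ [c] := by simp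
    rw [this, pvEbody_append, ih]
    simp only [pvEmitAt, List.reverse_cons, List.length_reverse]
    split <;> simp_all [pvEbody]

lemma pairsLoop_nil (pairs : List (List Char)) : pvPairsLoop [] pairs = pairs := by
  rw [pvPairsLoop]; simp

lemma pairsLoop_cons (rest : List Char) (pairs : List (List Char)) (h : rest ≠ []) :
    pvPairsLoop rest pairs =
      pvPairsLoop (rest.take (rest.length - 2)) (pairs ++ [rest.drop (rest.length - 2)]) := by
  have hpos : 1 ≤ rest.length := by
    cases rest with | nil => exact absurd rfl h | cons a t => simp
  conv_lhs => rw [pvPairsLoop]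
  rw [dif_neg h, PySem.List.slice_to_neg_ofNat rest 2 (by omega),
      PySem.List.slice_from_neg_ofNat rest 2 (by omega)]

lemma pairsLoop_acc : ∀ (n : Nat) (rest : List Char), rest.length = n →
    ∀ pairs, pvPairsLoop rest pairs = pairs ++ pvPairsLoop rest [] := by
  intro n
  induction n using Nat.strong_induction_on with
  | _ n ih =>
    intro rest hlen pairs
    by_cases h : rest = []
    · subst h; simp [pvPairsLoop]
    · have hpos : 1 ≤ rest.length := by
        cases rest with | nil => exact absurd rfl h | cons a t => simp
      rw [pairsLoop_cons rest pairs h, pairsLoop_cons rest [] h]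
      have hlt : (rest.take (rest.length - 2)).length < n := by
        simp; omega
      rw [ih _ hlt _ rfl (pairs ++ _), ih _ hlt _ rfl ([] ++ _)]
      simp

lemma pairsLoop_step (rest : List Char) (h : rest ≠ []) :
    pvPairsLoop rest [] =
      rest.drop (rest.length - 2) :: pvPairsLoop (rest.take (rest.length - 2)) [] := by
  rw [pairsLoop_cons rest [] h, pairsLoop_acc _ _ rfl]
  simp

lemma pairsLoop_ne_nil (rest : List Char) (h : rest ≠ []) :
    pvPairsLoop rest [] ≠ [] := by
  rw [pairsLoop_step rest h]; simp

lemma join_snoc (xs : List (List Char)) (y : List Char) (h : xs ≠ []) :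
    PySem.Chars.join [','] (xs ++ [y]) = PySem.Chars.join [','] xs ++ ',' :: y := by
  induction xs with
  | nil => exact absurd rfl h
  | cons x xs ih =>
    cases xs with
    | nil => simp [PySem.Chars.join_cons_cons, PySem.Chars.join_singleton]
    | cons x2 xs2 =>
      simp only [List.cons_append]
      rw [PySem.Chars.join_cons_cons]
      have hih := ih (by simp)
      simp only [List.cons_append] at hih
      rw [hih]
      simp [PySem.Chars.join_cons_cons]

lemma pvEmitAt_append (x y : List Char) (j : Int) :
    pvEmitAt (x ++ y) j = pvEmitAt x (j + y.length) ++ pvEmitAt y j := by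
  induction x with
  | nil => simp [pvEmitAt]
  | cons c t ih =>
    simp only [List.cons_append, pvEmitAt, ih, List.length_append]
    have : j + ((t.length : Int) + (y.length : Int)) = j + (y.length : Int) + t.length := by ring
    push_cast
    rw [this]
    simp

lemma pvCond_true (j : Nat) (h3 : 3 ≤ j) (hodd : j % 2 = 1) : pvCond (j : Int) = true := by
  rw [pvCond_nat]; simp [h3, hodd]

lemma pvCond_false_even (j : Nat) (heven : j % 2 = 0) : pvCond (j : Int) = false := by
  rw [pvCond_nat]; simp; omega

lemma emitAt_groups : ∀ (n : Nat) (rest : List Char), rest.length = n → rest ≠ [] →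
    ∀ (j : Nat), 3 ≤ j → j % 2 = 1 →
    pvEmitAt rest (j : Int) =
      PySem.Chars.join [','] ((pvPairsLoop rest []).reverse) ++ [','] := by
  intro n
  induction n using Nat.strong_induction_on with
  | _ n ih =>
    intro rest hlen hne j hj3 hjodd
    match rest, hlen with
    | [a], hlen =>
      rw [pairsLoop_step [a] (by simp)]
      simp [pvEmitAt, pairsLoop_nil, pvCond_true j hj3 hjodd,
            PySem.Chars.join_singleton]
    | [a, b], hlen =>
      rw [pairsLoop_step [a, b] (by simp)]
      simp only [pvEmitAt, List.length_cons, List.length_nil]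
      norm_num
      rw [show ((j : Int) + 1) = ((j + 1 : Nat) : Int) from by push_cast; ring,
          pvCond_false_even (j + 1) (by omega), pvCond_true j hj3 hjodd]
      simp [pairsLoop_nil, PySem.Chars.join_singleton]
    | a :: b :: c :: t, hlen =>
      set rest := a :: b :: c :: t with hrest
      have hlen3 : 3 ≤ rest.length := by simp [hrest]
      have hsplit : rest = rest.take (rest.length - 2) ++ rest.drop (rest.length - 2) :=
        (List.take_append_drop _ _).symm
      have hfrontlen : (rest.take (rest.length - 2)).length = rest.length - 2 := by
        simp
      have hdroplen : (rest.drop (rest.length - 2)).length = 2 := by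
        simp; omega
      have hfrontne : rest.take (rest.length - 2) ≠ [] := by
        intro hc
        rw [hc] at hfrontlen
        simp at hfrontlen; omega
      have hdropne : rest.drop (rest.length - 2) ≠ [] := by
        intro hc; rw [hc] at hdroplen; simp at hdroplen
      conv_lhs => rw [hsplit]
      rw [pvEmitAt_append, hdroplen]
      rw [show ((j : Int) + ((2 : Nat) : Int)) = ((j + 2 : Nat) : Int) from by push_cast; ring]
      rw [ih (rest.length - 2) (by omega) _ hfrontlen hfrontne (j + 2) (by omega) (by omega)]
      rw [ih 2 (by omega) _ hdroplen hdropne j hj3 hjodd]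
      have hchunk : pvPairsLoop (rest.drop (rest.length - 2)) [] = [rest.drop (rest.length - 2)] := by
        rw [pairsLoop_step _ hdropne, hdroplen]
        simp [pairsLoop_nil]
      rw [hchunk, pairsLoop_step rest (by simp [hrest])]
      simp only [List.reverse_cons]
      rw [join_snoc ((pvPairsLoop (rest.take (rest.length - 2)) []).reverse) _
            (by simpa using pairsLoop_ne_nil _ hfrontne)]
      simp [PySem.Chars.join_singleton]

lemma emitAt_last3 (t : List Char) (h : t.length = 3) : pvEmitAt t 0 = t := by
  match t, h with
  | [a, b, c], _ =>
    simp only [pvEmitAt, List.length_cons, List.length_nil]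
    norm_num
    rw [show pvCond 2 = false from by decide, show pvCond 1 = false from by decide,
        show pvCond 0 = false from by decide]
    simp

-- ===== VERDICT (by name: the statement is the Claim_ definition above) =====
theorem indian_fmt_py_spec : Claim_equal_indian_fmt_py := by
  intro amount _
  unfold Spec_indian_fmt_py indian_fmt_py indian_fmt_py_alt
  dsimp only
  generalize PySem.Int.toChars amount = s
  by_cases hlen : s.length ≤ 3
  · rw [if_pos hlen, if_pos hlen]
  · rw [if_neg hlen, if_neg hlen]
    have hk : 4 ≤ s.length := by omega
    rw [foldl_enumerate_eq_ebody, List.nil_append, pvEbody_reverse, List.reverse_reverse]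
    rw [PySem.List.slice_to_neg_ofNat s 3 (by omega),
        PySem.List.slice_from_neg_ofNat s 3 (by omega)]
    have hsplit : s = s.take (s.length - 3) ++ s.drop (s.length - 3) :=
      (List.take_append_drop _ _).symm
    have hdroplen : (s.drop (s.length - 3)).length = 3 := by simp; omega
    have hfrontlen : (s.take (s.length - 3)).length = s.length - 3 := by simp
    have hfrontne : s.take (s.length - 3) ≠ [] := by
      intro hc; rw [hc] at hfrontlen; simp at hfrontlen; omega
    have hE : pvEmitAt s 0 =
        pvEmitAt (s.take (s.length - 3)) (((3 : Nat) : Int)) ++ s.drop (s.length - 3) := by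
      conv_lhs => rw [hsplit]
      rw [pvEmitAt_append, hdroplen, emitAt_last3 _ hdroplen,
          show ((0 : Int) + ((3 : Nat) : Int)) = (((3 : Nat)) : Int) from by norm_num]
    rw [hE, emitAt_groups _ _ hfrontlen hfrontne 3 (by omega) (by omega)]
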